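-- pv_equiv track=rewrite | github.com/jachetheboss/Programming | USACO/2.3/zerosum.py | to_base_3
-- ===== SOURCE A (Python) =====
-- def to_base_3(num):
--     if num == 0:
--         return [0]
--     e = 0
--     while 3 ** e <= num:
--         e += 1
--     e -= 1
--     arr = []
--     while e > -1:
--         if num >= 3 ** e:
--             arr.append(num // (3 ** e))
--             num = num % (3 ** e)
--         else:
--             arr.append(0)
--         e -= 1
--
--     return arr
-- ===== SOURCE B (Python) =====
-- def to_base_3(num):
--     if num == 0:
--         return [0]
--     n = num
--     digits = []
--     while n > 0:
--         digits.append(n % 3)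
--         n //= 3
--     return digits[::-1]
-- ===== Notes on version B (the rewrite author's own statement) =====
-- stated objective: simpler
-- what changed: B replaces A's top-power search plus MSB-down scan (computing 3**e repeatedly) with the standard repeated divmod-by-3 loop building digits LSB-first and reversing once.
import Mathlib
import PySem

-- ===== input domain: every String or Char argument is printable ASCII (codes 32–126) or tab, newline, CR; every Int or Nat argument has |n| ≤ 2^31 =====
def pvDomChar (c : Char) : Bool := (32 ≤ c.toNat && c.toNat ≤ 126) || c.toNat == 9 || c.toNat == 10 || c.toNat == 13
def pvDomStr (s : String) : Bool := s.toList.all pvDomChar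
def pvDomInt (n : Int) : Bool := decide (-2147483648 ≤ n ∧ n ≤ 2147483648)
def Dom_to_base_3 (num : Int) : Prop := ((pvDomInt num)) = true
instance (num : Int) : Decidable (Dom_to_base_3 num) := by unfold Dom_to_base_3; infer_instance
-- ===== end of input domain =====

-- B replaces A's top-power search + MSB-down scan with the standard divmod-by-3 loop plus one reverse; return values proved equal for all ints (objective: simpler).

-- ===== PORT A =====
-- termination helper for A's first while loop (cited by findE's decreasing_by)
theorem pv_le_three_pow (e : Nat) : (e : Int) + 1 ≤ 3 ^ e := by
  induction e with
  | zero => simp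
  | succ n ih => rw [pow_succ]; push_cast; linarith

-- A's first loop: 'e = 0; while 3 ** e <= num: e += 1'; returns the final e
def findE (num : Int) (e : Nat) : Nat :=
  if (3:Int) ^ e ≤ num then findE num (e + 1) else e
termination_by num.toNat + 1 - e
decreasing_by
  have := pv_le_three_pow e
  omega

-- A's second loop: argument (e+1) means current exponent e, looping down to 0 ('while e > -1')
def loopA (num : Int) : Nat → List Int
  | 0 => []
  | e + 1 =>
    if num ≥ 3 ^ e then
      PySem.Int.floordiv num (3 ^ e) :: loopA (PySem.Int.mod num (3 ^ e)) e
    else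
      0 :: loopA num e

def to_base_3 (num : Int) : List Int :=
  if num = 0 then [0]
  else loopA num (findE num 0)

-- ===== PORT B =====
-- B's loop: 'while n > 0: digits.append(n % 3); n //= 3' (list built LSB-first)
def loopB (n : Int) : List Int :=
  if 0 < n then PySem.Int.mod n 3 :: loopB (PySem.Int.floordiv n 3) else []
termination_by n.toNat
decreasing_by
  rw [PySem.Int.floordiv_eq_ediv_of_pos (by omega)]
  omega

def to_base_3_alt (num : Int) : List Int :=
  if num = 0 then [0]
  else (loopB num).reverse

-- ===== PRECONDITION & SPEC =====
def Spec_to_base_3 (num : Int) (out : List Int) : Prop := out = to_base_3_alt num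
instance (num : Int) (out : List Int) : Decidable (Spec_to_base_3 num out) := by unfold Spec_to_base_3; infer_instance

-- ===== CLAIM (what is proved, stated in full; the proofs are below) =====
def Claim_equal_to_base_3 : Prop := ∀ (num : Int), Dom_to_base_3 num → Spec_to_base_3 num (to_base_3 num)

-- ===== LEMMAS AND PROOFS =====

-- canonical fixed-width MSB-first base-3 digit list (proof-only bridge between the two loops)
def canon : Nat → Int → List Int
  | 0, _ => []
  | e + 1, num => PySem.Int.floordiv num (3 ^ e) :: canon e (PySem.Int.mod num (3 ^ e))

theorem findE_upper (num : Int) (e : Nat) : num < 3 ^ findE num e := by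
  induction e using findE.induct (num := num) with
  | case1 e h ih => rw [findE, if_pos h]; exact ih
  | case2 e h => rw [findE, if_neg h]; omega

theorem findE_lower (num : Int) (e : Nat) :
    (3:Int) ^ e ≤ num → e < findE num e ∧ (3:Int) ^ (findE num e - 1) ≤ num := by
  induction e using findE.induct (num := num) with
  | case1 e h ih =>
    intro _
    rw [findE, if_pos h]
    by_cases h2 : (3:Int) ^ (e + 1) ≤ num
    · obtain ⟨ha, hb⟩ := ih h2
      exact ⟨by omega, hb⟩
    · rw [findE, if_neg h2]
      exact ⟨by omega, by simpa using h⟩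
  | case2 e h => intro hc; exact absurd hc h

theorem loopA_eq_canon (e : Nat) : ∀ num : Int, 0 ≤ num → num < 3 ^ e →
    loopA num e = canon e num := by
  induction e with
  | zero => intro num _ _; rfl
  | succ e ih =>
    intro num h0 hub
    have h3 : (0:Int) < 3 ^ e := by positivity
    by_cases h : num ≥ 3 ^ e
    · rw [loopA, if_pos h, canon]
      congr 1
      exact ih _ (PySem.Int.mod_nonneg _ h3) (PySem.Int.mod_lt _ h3)
    · rw [loopA, if_neg h, canon]
      have hd : PySem.Int.floordiv num (3 ^ e) = 0 := by
        rw [PySem.Int.floordiv_eq_ediv_of_pos h3]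
        exact Int.ediv_eq_zero_of_lt h0 (by omega)
      have hm : PySem.Int.mod num (3 ^ e) = num := by
        rw [PySem.Int.mod_eq_emod_of_pos h3]
        exact Int.emod_eq_of_lt h0 (by omega)
      rw [hd, hm]
      congr 1
      exact ih _ h0 (by omega)

theorem canon_succ_low (e : Nat) : ∀ num : Int, 0 ≤ num → num < 3 ^ (e + 1) →
    canon (e + 1) num = canon e (PySem.Int.floordiv num 3) ++ [PySem.Int.mod num 3] := by
  induction e with
  | zero =>
    intro num h0 hub
    simp only [canon, pow_zero, List.nil_append]
    rw [PySem.Int.floordiv_eq_ediv_of_pos (by norm_num : (0:Int) < 1), Int.ediv_one,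
        PySem.Int.mod_eq_emod_of_pos (by norm_num : (0:Int) < 3),
        Int.emod_eq_of_lt h0 (by simpa using hub)]
  | succ e ih =>
    intro num h0 hub
    have h3 : (0:Int) < 3 ^ (e + 1) := by positivity
    have h3' : (0:Int) < 3 ^ e := by positivity
    rw [canon]
    conv_rhs => rw [canon]
    simp only [List.cons_append]
    have hdd : PySem.Int.floordiv (PySem.Int.floordiv num 3) (3 ^ e)
        = PySem.Int.floordiv num (3 ^ (e + 1)) := by
      rw [PySem.Int.floordiv_eq_ediv_of_pos (by norm_num : (0:Int) < 3),
          PySem.Int.floordiv_eq_ediv_of_pos h3',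
          PySem.Int.floordiv_eq_ediv_of_pos h3,
          Int.ediv_ediv_of_nonneg (by norm_num : (0:Int) ≤ 3),
          show (3:Int) * 3 ^ e = 3 ^ (e + 1) by ring]
    rw [hdd]
    congr 1
    rw [ih (PySem.Int.mod num (3 ^ (e + 1))) (PySem.Int.mod_nonneg _ h3) (PySem.Int.mod_lt _ h3)]
    have hm3 : PySem.Int.mod (PySem.Int.mod num (3 ^ (e + 1))) 3 = PySem.Int.mod num 3 := by
      rw [PySem.Int.mod_eq_emod_of_pos h3, PySem.Int.mod_eq_emod_of_pos (by norm_num),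
          PySem.Int.mod_eq_emod_of_pos (by norm_num)]
      exact Int.emod_emod_of_dvd _ ⟨3 ^ e, by ring⟩
    have hdm : PySem.Int.floordiv (PySem.Int.mod num (3 ^ (e + 1))) 3
        = PySem.Int.mod (PySem.Int.floordiv num 3) (3 ^ e) := by
      rw [PySem.Int.mod_eq_emod_of_pos h3, PySem.Int.mod_eq_emod_of_pos h3',
          PySem.Int.floordiv_eq_ediv_of_pos (by norm_num : (0:Int) < 3),
          PySem.Int.floordiv_eq_ediv_of_pos (by norm_num : (0:Int) < 3),
          show (3:Int) ^ (e + 1) = 3 * 3 ^ e by ring]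
      have h1 : num % (3 * 3 ^ e) = num + (-(3 ^ e * (num / (3 * 3 ^ e)))) * 3 := by
        rw [Int.emod_def]; ring
      rw [h1, Int.add_mul_ediv_right _ _ (by norm_num : (3:Int) ≠ 0),
          ← Int.ediv_ediv_of_nonneg (by norm_num : (0:Int) ≤ 3), Int.emod_def]
      ring
    rw [hm3, hdm]

theorem loopB_reverse_eq_canon (e : Nat) : ∀ num : Int,
    3 ^ e ≤ num → num < 3 ^ (e + 1) →
    (loopB num).reverse = canon (e + 1) num := by
  induction e with
  | zero =>
    intro num hlb hub
    simp only [pow_zero] at hlb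
    rw [loopB, if_pos (by omega)]
    have hd : PySem.Int.floordiv num 3 = 0 := by
      rw [PySem.Int.floordiv_eq_ediv_of_pos (by norm_num)]
      exact Int.ediv_eq_zero_of_lt (by omega) (by simpa using hub)
    rw [hd, loopB, if_neg (by norm_num),
        canon_succ_low 0 num (by omega) hub, hd]
    rfl
  | succ e ih =>
    intro num hlb hub
    have h3 : (0:Int) < 3 ^ (e + 1) := by positivity
    rw [loopB, if_pos (by omega)]
    have hlb' : (3:Int) ^ e ≤ PySem.Int.floordiv num 3 := by
      rw [PySem.Int.le_floordiv_iff_mul_le (by norm_num)]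
      calc (3:Int) ^ e * 3 = 3 ^ (e + 1) := by ring
        _ ≤ num := hlb
    have hub' : PySem.Int.floordiv num 3 < 3 ^ (e + 1) := by
      rw [PySem.Int.floordiv_lt_iff_lt_mul (by norm_num)]
      calc num < 3 ^ (e + 1 + 1) := hub
        _ = 3 ^ (e + 1) * 3 := by ring
    rw [canon_succ_low (e + 1) num (by omega) hub]
    simp only [List.reverse_cons]
    rw [ih _ hlb' hub']

-- ===== VERDICT (by name: the statement is the Claim_ definition above) =====
theorem to_base_3_spec : Claim_equal_to_base_3 := by
  intro num _
  unfold Spec_to_base_3 to_base_3 to_base_3_alt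
  by_cases h0 : num = 0
  · simp [h0]
  rw [if_neg h0, if_neg h0]
  by_cases hpos : 0 < num
  · have h1 : (3:Int) ^ 0 ≤ num := by simpa using hpos
    obtain ⟨hgt, hlow⟩ := findE_lower num 0 h1
    have hup := findE_upper num 0
    obtain ⟨e, he⟩ : ∃ e, findE num 0 = e + 1 := ⟨findE num 0 - 1, by omega⟩
    rw [he] at hlow hup ⊢
    simp only [Nat.add_sub_cancel] at hlow
    rw [loopA_eq_canon (e + 1) num (by omega) hup]
    exact (loopB_reverse_eq_canon e num hlow hup).symm
  · rw [findE, if_neg (by simp; omega), loopA, loopB, if_neg (by omega)]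
    rfl
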